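-- pv_equiv track=rewrite | github.com/lcpt/python_simple_examples | parsing/raw_parsing_example.py | parse_comma_separated_list
-- ===== SOURCE A (Python) =====
-- def parse_comma_separated_list(inputString, delimiter= ',', quotationMark= '"'):
--     retval= list()
--     item= str()
--     quotedString= False
--     for c in inputString:
--         if(c==quotationMark):
--             item+= c
--             if(not quotedString): # Quoted string starts.
--                 quotedString= True
--             else: # Quoted string ends.
--                 quotedString= False
--         else:
--             if(c==delimiter and not quotedString): # item ends.
--                 retval.append(item)
--                 item= str()
--             else:
--                 item+=c
--     retval.append(item)
--     return retval
-- ===== SOURCE B (Python) =====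
-- def parse_comma_separated_list(inputString, delimiter=',', quotationMark='"'):
--     # Pass 1: find the indices of real split points (delimiter chars at even quote parity).
--     cuts = []
--     quoted = False
--     for i, c in enumerate(inputString):
--         if c == quotationMark:
--             quoted = not quoted
--         elif c == delimiter and not quoted:
--             cuts.append(i)
--     # Pass 2: slice the input between consecutive cut positions.
--     parts = []
--     start = 0
--     for j in cuts:
--         parts.append(inputString[start:j])
--         start = j + 1
--     parts.append(inputString[start:])
--     return parts
-- ===== Notes on version B (the rewrite author's own statement) =====
-- stated objective: alternative
-- what changed: Replaced A's char-by-char buffer accumulation with a two-pass scheme: one quote-parity scan collecting split indices, then slicing the input between consecutive cuts.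
import Mathlib
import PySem

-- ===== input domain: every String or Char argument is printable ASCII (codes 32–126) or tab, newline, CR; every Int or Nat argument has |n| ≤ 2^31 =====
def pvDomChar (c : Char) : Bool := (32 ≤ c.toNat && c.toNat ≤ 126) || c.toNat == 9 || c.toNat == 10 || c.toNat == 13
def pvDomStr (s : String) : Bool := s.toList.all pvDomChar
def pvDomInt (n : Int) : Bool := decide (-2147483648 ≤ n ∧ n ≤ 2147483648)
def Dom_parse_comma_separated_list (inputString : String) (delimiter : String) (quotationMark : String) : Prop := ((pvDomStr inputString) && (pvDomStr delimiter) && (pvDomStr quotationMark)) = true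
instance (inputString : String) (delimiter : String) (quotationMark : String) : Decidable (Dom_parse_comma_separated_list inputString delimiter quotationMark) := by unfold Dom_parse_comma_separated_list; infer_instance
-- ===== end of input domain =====

-- B finds all split indices in one quote-parity scan and then slices the input between them,
-- instead of A's char-by-char buffer accumulation (a different decomposition of the same task).

-- ===== PORT A =====
-- A's for-loop over the characters, carrying (retval, item, quotedString); item kept as List Char.
def pvGoA (delimiter quotationMark : String) : List Char → List String → List Char → Bool → List String
  | [], retval, item, _ => retval ++ [String.ofList item]
  | c :: cs, retval, item, quoted =>
    if String.singleton c == quotationMark then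
      pvGoA delimiter quotationMark cs retval (item ++ [c]) (!quoted)
    else if String.singleton c == delimiter && !quoted then
      pvGoA delimiter quotationMark cs (retval ++ [String.ofList item]) [] quoted
    else
      pvGoA delimiter quotationMark cs retval (item ++ [c]) quoted

def parse_comma_separated_list (inputString : String) (delimiter : String) (quotationMark : String) : List String :=
  pvGoA delimiter quotationMark inputString.toList [] [] false

-- ===== PORT B =====
-- Pass 1 of Source B: indices of delimiter chars at even quote parity.
def pvGoCuts (delimiter quotationMark : String) : List Char → Nat → Bool → List Nat
  | [], _, _ => []
  | c :: cs, i, quoted =>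
    if String.singleton c == quotationMark then
      pvGoCuts delimiter quotationMark cs (i + 1) (!quoted)
    else if String.singleton c == delimiter && !quoted then
      i :: pvGoCuts delimiter quotationMark cs (i + 1) quoted
    else
      pvGoCuts delimiter quotationMark cs (i + 1) quoted

-- Pass 2 of Source B: slice the input between consecutive cut positions (s[start:j], finally s[start:]).
def pvGoParts (s : List Char) : Nat → List Nat → List String
  | start, [] => [String.ofList (s.drop start)]
  | start, j :: cuts => String.ofList ((s.drop start).take (j - start)) :: pvGoParts s (j + 1) cuts

def parse_comma_separated_list_alt (inputString : String) (delimiter : String) (quotationMark : String) : List String :=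
  pvGoParts inputString.toList 0 (pvGoCuts delimiter quotationMark inputString.toList 0 false)

-- ===== PRECONDITION & SPEC =====
def Spec_parse_comma_separated_list (inputString : String) (delimiter : String) (quotationMark : String) (out : List String) : Prop := out = parse_comma_separated_list_alt inputString delimiter quotationMark
instance (inputString : String) (delimiter : String) (quotationMark : String) (out : List String) : Decidable (Spec_parse_comma_separated_list inputString delimiter quotationMark out) := by unfold Spec_parse_comma_separated_list; infer_instance

-- ===== CLAIM (what is proved, stated in full; the proofs are below) =====
def Claim_equal_parse_comma_separated_list : Prop := ∀ (inputString : String) (delimiter : String) (quotationMark : String), Dom_parse_comma_separated_list inputString delimiter quotationMark → Spec_parse_comma_separated_list inputString delimiter quotationMark (parse_comma_separated_list inputString delimiter quotationMark)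

-- ===== LEMMAS AND PROOFS =====

-- Common reference semantics: the list of items (as char lists) of a suffix at a given parity.
def pvConsHead (c : Char) : List (List Char) → List (List Char)
  | [] => [[c]]
  | h :: t => (c :: h) :: t

def pvSpecParse (delimiter quotationMark : String) : List Char → Bool → List (List Char)
  | [], _ => [[]]
  | c :: cs, b =>
    if String.singleton c == quotationMark then
      pvConsHead c (pvSpecParse delimiter quotationMark cs (!b))
    else if String.singleton c == delimiter && !b then
      [] :: pvSpecParse delimiter quotationMark cs b
    else
      pvConsHead c (pvSpecParse delimiter quotationMark cs b)

def pvMapHead (f : List Char → List Char) : List (List Char) → List (List Char)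
  | [] => []
  | h :: t => f h :: t

lemma pvConsHead_ne_nil (c : Char) (l : List (List Char)) : pvConsHead c l ≠ [] := by
  cases l <;> simp [pvConsHead]

lemma pvSpecParse_ne_nil (d q : String) (cs : List Char) (b : Bool) :
    pvSpecParse d q cs b ≠ [] := by
  cases cs with
  | nil => simp [pvSpecParse]
  | cons c cs =>
    simp only [pvSpecParse]
    split_ifs <;> first
      | exact pvConsHead_ne_nil _ _
      | simp

lemma pvMapHead_consHead (item : List Char) (c : Char) (l : List (List Char)) (hl : l ≠ []) :
    pvMapHead (fun x => item ++ x) (pvConsHead c l)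
      = pvMapHead (fun x => (item ++ [c]) ++ x) l := by
  cases l with
  | nil => exact absurd rfl hl
  | cons h t => simp [pvConsHead, pvMapHead]

-- A equals the reference semantics.
lemma goA_spec (d q : String) (cs : List Char) :
    ∀ (retval : List String) (item : List Char) (b : Bool),
    pvGoA d q cs retval item b
      = retval ++ (pvMapHead (fun x => item ++ x) (pvSpecParse d q cs b)).map String.ofList := by
  induction cs with
  | nil => intro retval item b; simp [pvGoA, pvSpecParse, pvMapHead]
  | cons c cs ih =>
    intro retval item b
    simp only [pvGoA, pvSpecParse]
    split_ifs with h1 h2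
    · rw [ih, pvMapHead_consHead _ _ _ (pvSpecParse_ne_nil d q cs (!b))]
    · rw [ih]
      rcases hne : pvSpecParse d q cs b with _ | ⟨h, t⟩
      · exact absurd hne (pvSpecParse_ne_nil d q cs b)
      · simp [pvMapHead]
    · rw [ih, pvMapHead_consHead _ _ _ (pvSpecParse_ne_nil d q cs b)]

-- every produced cut index is ≥ the running index
lemma pvGoCuts_ge (d q : String) (cs : List Char) :
    ∀ (i : Nat) (b : Bool) (j : Nat), j ∈ pvGoCuts d q cs i b → i ≤ j := by
  induction cs with
  | nil => intro i b j h; simp [pvGoCuts] at h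
  | cons c cs ih =>
    intro i b j h
    simp only [pvGoCuts] at h
    split_ifs at h with h1 h2
    · exact le_trans (Nat.le_succ i) (ih (i+1) (!b) j h)
    · rcases List.mem_cons.mp h with rfl | h
      · exact le_refl j
      · exact le_trans (Nat.le_succ i) (ih (i+1) b j h)
    · exact le_trans (Nat.le_succ i) (ih (i+1) b j h)

def pvConsHeadStr (c : Char) : List String → List String
  | [] => []
  | h :: t => String.ofList (c :: h.toList) :: t

lemma pvGoParts_shift (s : List Char) (c : Char) (i : Nat) (hdrop : s.drop i = c :: s.drop (i+1))
    (cuts : List Nat) (hge : ∀ j ∈ cuts, i + 1 ≤ j) :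
    pvGoParts s i cuts = pvConsHeadStr c (pvGoParts s (i+1) cuts) := by
  cases cuts with
  | nil => simp [pvGoParts, pvConsHeadStr, hdrop]
  | cons j cuts =>
    have hj : i + 1 ≤ j := hge j (List.mem_cons_self)
    have : (s.drop i).take (j - i) = c :: (s.drop (i+1)).take (j - (i+1)) := by
      rw [hdrop]
      have : j - i = (j - (i+1)) + 1 := by omega
      rw [this, List.take_succ_cons]
    simp [pvGoParts, pvConsHeadStr, this]

lemma consHeadStr_map_mk (c : Char) (l : List (List Char)) (hl : l ≠ []) :
    pvConsHeadStr c (l.map String.ofList) = (pvConsHead c l).map String.ofList := by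
  cases l with
  | nil => exact absurd rfl hl
  | cons h t => simp [pvConsHeadStr, pvConsHead]

-- B equals the reference semantics.
lemma goParts_goCuts_spec (d q : String) (s : List Char) (cs : List Char) :
    ∀ (i : Nat) (b : Bool), s.drop i = cs →
    pvGoParts s i (pvGoCuts d q cs i b) = (pvSpecParse d q cs b).map String.ofList := by
  induction cs with
  | nil => intro i b h; simp [pvGoCuts, pvGoParts, pvSpecParse, h]
  | cons c cs ih =>
    intro i b h
    have hdrop1 : s.drop (i+1) = cs := by
      rw [← List.tail_drop, h]; rfl
    have hdrop : s.drop i = c :: s.drop (i+1) := by rw [h, hdrop1]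
    simp only [pvGoCuts, pvSpecParse]
    split_ifs with h1 h2
    · rw [pvGoParts_shift s c i hdrop _ (fun j hj => pvGoCuts_ge d q cs (i+1) (!b) j hj),
        ih (i+1) (!b) hdrop1, consHeadStr_map_mk _ _ (pvSpecParse_ne_nil d q cs (!b))]
    · simp only [pvGoParts]
      rw [ih (i+1) b hdrop1]
      simp
    · rw [pvGoParts_shift s c i hdrop _ (fun j hj => pvGoCuts_ge d q cs (i+1) b j hj),
        ih (i+1) b hdrop1, consHeadStr_map_mk _ _ (pvSpecParse_ne_nil d q cs b)]

lemma pvMapHead_nil_append (l : List (List Char)) :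
    pvMapHead (fun x => ([] : List Char) ++ x) l = l := by
  cases l <;> simp [pvMapHead]

-- ===== VERDICT (by name: the statement is the Claim_ definition above) =====
theorem parse_comma_separated_list_spec : Claim_equal_parse_comma_separated_list := by
  intro s d q _
  show parse_comma_separated_list s d q = parse_comma_separated_list_alt s d q
  unfold parse_comma_separated_list parse_comma_separated_list_alt
  rw [goA_spec, goParts_goCuts_spec d q s.toList s.toList 0 false (by simp),
    pvMapHead_nil_append]
  simp
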